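-- pv_equiv track=rewrite | github.com/pierpaolo28/Algorithms | Practice/bigO.py | better_sol
-- ===== SOURCE A (Python) =====
-- def better_sol(n):
--     solutions = 0
--     for a in range(n + 1):
--         for b in range(n + 1):
--             c = n - (a + b)
--             if c >= 0:
--                 solutions += 1
--     return solutions
-- ===== SOURCE B (Python) =====
-- def better_sol(n):
--     # closed form: number of (a, b) in [0, n]^2 with a + b <= n is (n+1)(n+2)/2
--     return (n + 1) * (n + 2) // 2 if n >= 0 else 0
-- ===== Notes on version B (the rewrite author's own statement) =====
-- stated objective: faster
-- what changed: replaced the quadratic double loop counting pairs a,b with a+b at most n by the closed-form triangular-number formula (zero for negative n)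
import Mathlib
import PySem

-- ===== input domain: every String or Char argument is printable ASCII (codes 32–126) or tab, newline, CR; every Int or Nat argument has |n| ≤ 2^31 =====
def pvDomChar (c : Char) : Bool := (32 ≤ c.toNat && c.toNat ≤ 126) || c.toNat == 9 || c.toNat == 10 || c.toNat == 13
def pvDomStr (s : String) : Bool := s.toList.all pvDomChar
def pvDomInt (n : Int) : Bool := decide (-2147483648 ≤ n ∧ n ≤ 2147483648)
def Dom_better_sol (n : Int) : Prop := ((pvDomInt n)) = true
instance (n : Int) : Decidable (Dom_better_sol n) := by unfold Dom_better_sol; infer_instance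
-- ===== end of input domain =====

-- B replaces A's quadratic double loop by the closed-form triangular-number count (zero for negative n): asymptotically faster.

-- ===== PORT A =====
def better_sol (n : Int) : Int :=
  (PySem.List.pyRange 0 (n + 1) 1).foldl (fun solutions a =>
    (PySem.List.pyRange 0 (n + 1) 1).foldl (fun solutions b =>
      let c := n - (a + b)
      if c ≥ 0 then solutions + 1 else solutions) solutions) 0

-- ===== PORT B =====
def better_sol_alt (n : Int) : Int :=
  if n ≥ 0 then PySem.Int.floordiv ((n + 1) * (n + 2)) 2 else 0

-- ===== PRECONDITION & SPEC =====
def Spec_better_sol (n : Int) (out : Int) : Prop := out = better_sol_alt n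
instance (n : Int) (out : Int) : Decidable (Spec_better_sol n out) := by unfold Spec_better_sol; infer_instance

-- ===== CLAIM (what is proved, stated in full; the proofs are below) =====
def Claim_equal_better_sol : Prop := ∀ (n : Int), Dom_better_sol n → Spec_better_sol n (better_sol n)

-- ===== LEMMAS AND PROOFS =====

-- inner loop of A: for one fixed a with 0 ≤ a ≤ n it adds n - a + 1 to the accumulator
lemma inner_eq (n a : Int) (h0 : 0 ≤ a) (h1 : a ≤ n) (s : Int) :
    (PySem.List.pyRange 0 (n + 1) 1).foldl (fun solutions b =>
      let c := n - (a + b)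
      if c ≥ 0 then solutions + 1 else solutions) s = s + (n - a + 1) := by
  rw [show (fun (solutions : Int) b =>
      let c := n - (a + b)
      if c ≥ 0 then solutions + 1 else solutions)
    = fun (solutions : Int) b => if n - (a + b) ≥ 0 then solutions + 1 else solutions from rfl]
  rw [PySem.List.foldl_ite_add_one]
  rw [PySem.List.pyRange_one_append 0 (n - a + 1) (n + 1) (by omega) (by omega),
      List.countP_append]
  have hfst : (PySem.List.pyRange 0 (n - a + 1) 1).countP
      (fun b => decide (n - (a + b) ≥ 0)) = (PySem.List.pyRange 0 (n - a + 1) 1).length := by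
    rw [List.countP_eq_length]
    intro b hb
    have := PySem.List.mem_pyRange_one.mp hb
    simp only [decide_eq_true_eq]; omega
  have hsnd : (PySem.List.pyRange (n - a + 1) (n + 1) 1).countP
      (fun b => decide (n - (a + b) ≥ 0)) = 0 := by
    rw [List.countP_eq_zero]
    intro b hb
    have := PySem.List.mem_pyRange_one.mp hb
    simp only [decide_eq_true_eq]; omega
  rw [hfst, hsnd, PySem.List.length_pyRange_one]
  have : ((n - a + 1 - 0).toNat : Int) = n - a + 1 := by omega
  omega

-- twice the triangular sum ∑_{k<m} (m - k)
lemma tri_sum (m : Nat) :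
    2 * (((List.range m).map (fun k : Nat => (m : Int) - (k : Int))).sum) = m * (m + 1) := by
  induction m with
  | zero => simp
  | succ m ih =>
    rw [List.range_succ, List.map_append, List.sum_append]
    have hstep : ((List.range m).map (fun k : Nat => ((m + 1 : Nat) : Int) - (k : Int))).sum
        = ((List.range m).map (fun k : Nat => (m : Int) - (k : Int))).sum + m := by
      have : ((List.range m).map (fun k : Nat => ((m + 1 : Nat) : Int) - (k : Int)))
          = (List.range m).map (fun k : Nat => ((m : Int) - (k : Int)) + 1) := by
        apply List.map_congr_left; intro k _; push_cast; ring
      rw [this, PySem.List.sum_map_add_int]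
      simp
    rw [hstep]
    push_cast
    push_cast at ih
    simp only [List.map_cons, List.map_nil, List.sum_cons, List.sum_nil]
    ring_nf
    ring_nf at ih
    omega

-- main equality
lemma better_sol_eq_alt (n : Int) : better_sol n = better_sol_alt n := by
  by_cases hn : 0 ≤ n
  · unfold better_sol better_sol_alt
    have hout : (PySem.List.pyRange 0 (n + 1) 1).foldl (fun solutions a =>
        (PySem.List.pyRange 0 (n + 1) 1).foldl (fun solutions b =>
          let c := n - (a + b)
          if c ≥ 0 then solutions + 1 else solutions) solutions) 0
        = (PySem.List.pyRange 0 (n + 1) 1).foldl (fun s a => s + (n - a + 1)) 0 := by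
      apply PySem.List.foldl_congr_mem'
      intro a ha s
      have := PySem.List.mem_pyRange_one.mp ha
      exact inner_eq n a (by omega) (by omega) s
    rw [hout, PySem.List.foldl_add]
    have hm : ((n + 1).toNat : Int) = n + 1 := by omega
    have hmap : (PySem.List.pyRange 0 (n + 1) 1).map (fun a => n - a + 1)
        = (List.range (n + 1).toNat).map (fun k : Nat => (((n + 1).toNat : Nat) : Int) - (k : Int)) := by
      rw [PySem.List.pyRange_one]
      rw [List.map_map]
      have hz : ((n + 1 : Int) - 0) = n + 1 := by ring
      rw [hz]
      apply List.map_congr_left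
      intro k _
      simp only [Function.comp_apply]
      omega
    rw [hmap]
    have h2 := tri_sum (n + 1).toNat
    have key : 2 * ((List.range (n + 1).toNat).map
        (fun k : Nat => (((n + 1).toNat : Nat) : Int) - (k : Int))).sum = (n + 1) * (n + 2) := by
      rw [h2, hm]; ring
    rw [if_pos hn, eq_comm, PySem.Int.floordiv_eq_iff_of_pos (by omega)]
    constructor <;> linarith [key]
  · unfold better_sol better_sol_alt
    rw [PySem.List.pyRange_one_eq_nil (by omega)]
    simp [hn]

-- ===== VERDICT (by name: the statement is the Claim_ definition above) =====
theorem better_sol_spec : Claim_equal_better_sol := by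
  intro n _
  exact better_sol_eq_alt n
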